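-- pv_equiv track=rewrite | github.com/Akhan521/bat-code | libs/batman-cli/batman_code/widgets/batcave.py | _compose_crt_text
-- ===== SOURCE A (Python) =====
-- _CRT_LETTERS: dict[str, list[str]] = {
--     "B": ["██████▄", "██  ▄██", "█████▀ ", "██  ▄██", "██████▀"],
--     "A": ["▄█████▄", "██   ██", "███████", "██   ██", "██   ██"],
--     "T": ["███████", "   ██  ", "   ██  ", "   ██  ", "   ██  "],
--     "C": ["▄██████", "██     ", "██     ", "██     ", "▀██████"],
--     "O": ["▄█████▄", "██   ██", "██   ██", "██   ██", "▀█████▀"],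
--     "M": ["██▄ ▄██", "███▀███", "██ ▀ ██", "██   ██", "██   ██"],
--     "P": ["██████▄", "██  ▄██", "█████▀ ", "██     ", "██     "],
--     "U": ["██   ██", "██   ██", "██   ██", "██▄ ▄██", "▀█████▀"],
--     "E": ["███████", "██     ", "█████  ", "██     ", "███████"],
--     "R": ["██████▄", "██  ▄██", "█████▀ ", "██ ▀█▄ ", "██   ██"],
-- }
--
-- _CRT_FONT_HEIGHT = 5
--
-- _CRT_LETTER_GAP = 1
--
-- def _compose_crt_text(text: str) -> list[str]:
--     """Compose text using compact 5-row CRT font (single word, no spaces)."""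
--     for letter_rows in _CRT_LETTERS.values():
--         max_w = max(len(row) for row in letter_rows)
--         for i, row in enumerate(letter_rows):
--             letter_rows[i] = row.ljust(max_w)
--     letters = [_CRT_LETTERS[ch] for ch in text]
--     spacer = " " * _CRT_LETTER_GAP
--     return [spacer.join(L[row] for L in letters) for row in range(_CRT_FONT_HEIGHT)]
-- ===== SOURCE B (Python) =====
-- _CRT_LETTERS: dict[str, list[str]] = {
--     "B": ["██████▄", "██  ▄██", "█████▀ ", "██  ▄██", "██████▀"],
--     "A": ["▄█████▄", "██   ██", "███████", "██   ██", "██   ██"],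
--     "T": ["███████", "   ██  ", "   ██  ", "   ██  ", "   ██  "],
--     "C": ["▄██████", "██     ", "██     ", "██     ", "▀██████"],
--     "O": ["▄█████▄", "██   ██", "██   ██", "██   ██", "▀█████▀"],
--     "M": ["██▄ ▄██", "███▀███", "██ ▀ ██", "██   ██", "██   ██"],
--     "P": ["██████▄", "██  ▄██", "█████▀ ", "██     ", "██     "],
--     "U": ["██   ██", "██   ██", "██   ██", "██▄ ▄██", "▀█████▀"],
--     "E": ["███████", "██     ", "█████  ", "██     ", "███████"],
--     "R": ["██████▄", "██  ▄██", "█████▀ ", "██ ▀█▄ ", "██   ██"],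
-- }
--
-- _CRT_FONT_HEIGHT = 5
--
-- _CRT_LETTER_GAP = 1
--
--
-- def _compose_crt_text(text: str) -> list[str]:
--     """Compose text using compact 5-row CRT font (single word, no spaces).
--
--     Letter-major single pass: append each glyph's rows to 5 accumulators.
--     (Every glyph row in the table is already 7 columns wide, so the original's
--     re-padding pass is a no-op and is omitted.)
--     """
--     rows = [""] * _CRT_FONT_HEIGHT
--     gap = " " * _CRT_LETTER_GAP
--     for i, ch in enumerate(text):
--         glyph = _CRT_LETTERS[ch]
--         for r in range(_CRT_FONT_HEIGHT):
--             rows[r] += (gap if i else "") + glyph[r]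
--     return rows
-- ===== Notes on version B (the rewrite author's own statement) =====
-- stated objective: simpler
-- what changed: B drops the no-op ljust re-padding pass over the glyph table (every row is already 7 columns) and builds the banner letter-major in one pass, appending each glyph's rows to 5 accumulator strings instead of first collecting a letters list and joining row-major; A mutates the module-level glyph table in place (reassigning equal strings), B does not.
import Mathlib
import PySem

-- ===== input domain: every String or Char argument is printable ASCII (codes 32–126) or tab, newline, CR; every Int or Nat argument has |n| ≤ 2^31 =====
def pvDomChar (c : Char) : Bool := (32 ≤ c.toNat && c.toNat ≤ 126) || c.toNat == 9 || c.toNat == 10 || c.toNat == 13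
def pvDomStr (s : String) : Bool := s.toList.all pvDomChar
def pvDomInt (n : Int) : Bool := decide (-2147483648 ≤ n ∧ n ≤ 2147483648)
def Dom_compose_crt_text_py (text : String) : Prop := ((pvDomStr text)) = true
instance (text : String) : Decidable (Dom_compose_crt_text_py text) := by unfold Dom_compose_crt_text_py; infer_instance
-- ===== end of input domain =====

-- B composes the banner letter-major in one pass over the text with 5 row accumulators and omits
-- the original's no-op ljust re-padding pass (objective: simpler). A re-assigns equal strings into
-- the module-level glyph table in place; B does not; the equivalence proved is about the return value.

-- ===== PORT A =====
def pvCRTLetters : PySem.Dict String (List String) :=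
  PySem.Dict.mk [
    ("B", ["██████▄", "██  ▄██", "█████▀ ", "██  ▄██", "██████▀"]),
    ("A", ["▄█████▄", "██   ██", "███████", "██   ██", "██   ██"]),
    ("T", ["███████", "   ██  ", "   ██  ", "   ██  ", "   ██  "]),
    ("C", ["▄██████", "██     ", "██     ", "██     ", "▀██████"]),
    ("O", ["▄█████▄", "██   ██", "██   ██", "██   ██", "▀█████▀"]),
    ("M", ["██▄ ▄██", "███▀███", "██ ▀ ██", "██   ██", "██   ██"]),
    ("P", ["██████▄", "██  ▄██", "█████▀ ", "██     ", "██     "]),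
    ("U", ["██   ██", "██   ██", "██   ██", "██▄ ▄██", "▀█████▀"]),
    ("E", ["███████", "██     ", "█████  ", "██     ", "███████"]),
    ("R", ["██████▄", "██  ▄██", "█████▀ ", "██ ▀█▄ ", "██   ██"])]

-- hand port of str.ljust(w) with the default space fill (exact: pads on the right to max(len s, w))
def pvLjust (s : String) (w : Int) : String :=
  String.ofList (s.toList ++ List.replicate (w.toNat - s.toList.length) ' ')

-- the in-place padding loop body: max over the (nonempty) row list, then letter_rows[i] = row.ljust(max_w)
def pvPadRows (rows : List String) : List String :=
  let maxW : Int := ((PySem.List.max? (rows.map PySem.Str.len) id).getD 0)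
    -- every value list of the table is nonempty, so Python's max never raises; getD 0 is unreached
  (PySem.List.enumerate rows).map (fun p => pvLjust p.2 maxW)

def pvPaddedLetters : PySem.Dict String (List String) :=
  PySem.Dict.mk (pvCRTLetters.items.map (fun p => (p.1, pvPadRows p.2)))

def compose_crt_text_py (text : String) : List String :=
  -- letters = [_CRT_LETTERS[ch] for ch in text]; KeyError on unknown ch is excluded by Pre_, getD [] unreached;
  -- L[row] is in range (5 rows) for every table glyph, so pyGetD's "" default is unreached
  (PySem.List.pyRange 0 5 1).map (fun row =>
    PySem.Str.join " "
      ((text.toList.map (fun ch => (pvPaddedLetters.get? (String.ofList [ch])).getD [])).map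
        (fun L => PySem.List.pyGetD L row "")))

-- ===== PORT B =====
-- str concatenation (a + b), done on the code-point lists as all PySem string primitives are
def pvCat (a b : String) : String := String.ofList (a.toList ++ b.toList)

-- the loop body: rows[r] += (gap if i else "") + glyph[r] for r in range(5)
def pvStep (rows : List String) (p : Int × Char) : List String :=
  let glyph := (pvCRTLetters.get? (String.ofList [p.2])).getD []   -- KeyError excluded by Pre_
  (PySem.List.pyRange 0 5 1).map (fun r =>
    pvCat (PySem.List.pyGetD rows r "")
      (pvCat (if p.1 == 0 then "" else " ") (PySem.List.pyGetD glyph r "")))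

def compose_crt_text_py_alt (text : String) : List String :=
  (PySem.List.enumerate text.toList).foldl pvStep ["", "", "", "", ""]

-- ===== PRECONDITION & SPEC =====
-- Pre_ excludes exactly the inputs on which Python A raises KeyError: texts containing a character
-- that is not one of the ten glyph keys.
def Pre_compose_crt_text_py (text : String) : Prop :=
  text.toList.all (fun c => c ∈ ['B','A','T','C','O','M','P','U','E','R']) = true
instance (text : String) : Decidable (Pre_compose_crt_text_py text) := by
  unfold Pre_compose_crt_text_py; infer_instance

def pvWitness_compose_crt_text_py : String := "BAT"

def Spec_compose_crt_text_py (text : String) (out : List String) : Prop := out = compose_crt_text_py_alt text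
instance (text : String) (out : List String) : Decidable (Spec_compose_crt_text_py text out) := by unfold Spec_compose_crt_text_py; infer_instance

-- ===== CLAIM (what is proved, stated in full; the proofs are below) =====
def Claim_equal_compose_crt_text_py : Prop := ∀ (text : String), Dom_compose_crt_text_py text → Pre_compose_crt_text_py text → Spec_compose_crt_text_py text (compose_crt_text_py text)

-- ===== LEMMAS AND PROOFS =====

-- the glyph of a character as both ports look it up, and its row r
def pvG (c : Char) : List String := (pvCRTLetters.get? (String.ofList [c])).getD []
def pvRow (c : Char) (r : Int) : String := PySem.List.pyGetD (pvG c) r ""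

theorem pvPadded_eq : pvPaddedLetters = pvCRTLetters := by decide

theorem pvRange5 : PySem.List.pyRange 0 5 1 = [0, 1, 2, 3, 4] := by decide

theorem pvSpace : (" " : String).toList = [' '] := by decide

theorem pvStr_ext {a b : String} (h : a.toList = b.toList) : a = b := by
  rw [← String.ofList_toList (s := a), h, String.ofList_toList]

-- the glyph columns appended to row r for each letter after the first
def pvTail (cs : List Char) (r : Int) : List Char :=
  (cs.map (fun c => ' ' :: (pvRow c r).toList)).flatten

theorem pvJoin_toList (x : String) (xs : List String) :
    (PySem.Str.join " " (x :: xs)).toList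
      = x.toList ++ (xs.map (fun s => ' ' :: s.toList)).flatten := by
  induction xs generalizing x with
  | nil => simp [PySem.Str.toList_join, PySem.Chars.join_singleton]
  | cons y ys ih =>
    have h := ih y
    rw [PySem.Str.toList_join] at h ⊢
    simp only [List.map_cons] at h ⊢
    rw [PySem.Chars.join_cons_cons, h]
    simp [List.append_assoc, pvSpace]

theorem pvStep_eval (a0 a1 a2 a3 a4 : String) (i : Int) (c : Char) :
    pvStep [a0, a1, a2, a3, a4] (i, c)
      = [pvCat a0 (pvCat (if i == 0 then "" else " ") (pvRow c 0)),
         pvCat a1 (pvCat (if i == 0 then "" else " ") (pvRow c 1)),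
         pvCat a2 (pvCat (if i == 0 then "" else " ") (pvRow c 2)),
         pvCat a3 (pvCat (if i == 0 then "" else " ") (pvRow c 3)),
         pvCat a4 (pvCat (if i == 0 then "" else " ") (pvRow c 4))] := by
  simp only [pvStep, pvRange5, pvG, pvRow, List.map_cons, List.map_nil]
  norm_num [PySem.List.pyGetD, PySem.List.pyGet?, PySem.List.pyIdx?]
  simp [show Int.toNat 2 = 2 from rfl, show Int.toNat 3 = 3 from rfl,
    show Int.toNat 4 = 4 from rfl]

theorem pvFold_inv (cs : List Char) (i : Int) (hi : 0 < i) (a0 a1 a2 a3 a4 : String) :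
    (PySem.List.enumerate cs i).foldl pvStep [a0, a1, a2, a3, a4]
    = [String.ofList (a0.toList ++ pvTail cs 0), String.ofList (a1.toList ++ pvTail cs 1),
       String.ofList (a2.toList ++ pvTail cs 2), String.ofList (a3.toList ++ pvTail cs 3),
       String.ofList (a4.toList ++ pvTail cs 4)] := by
  induction cs generalizing i a0 a1 a2 a3 a4 with
  | nil => simp [PySem.List.enumerate_nil, pvTail, String.ofList_toList]
  | cons c cs ih =>
    have hne : (i == 0) = false := by simp; omega
    rw [PySem.List.enumerate_cons, List.foldl_cons, pvStep_eval, hne]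
    rw [ih (i + 1) (by omega)]
    simp [pvCat, pvTail, String.toList_ofList, List.append_assoc, pvSpace]

theorem pvMain (text : String) :
    compose_crt_text_py text = compose_crt_text_py_alt text := by
  unfold compose_crt_text_py compose_crt_text_py_alt
  rw [pvPadded_eq]
  cases h : text.toList with
  | nil => decide
  | cons c cs =>
    rw [PySem.List.enumerate_cons, List.foldl_cons, pvStep_eval]
    simp only [show ((0 : Int) == 0) = true from rfl, if_true]
    have h01 : (0 : Int) + 1 = 1 := by norm_num
    rw [h01, pvFold_inv cs 1 (by omega)]
    rw [pvRange5]
    simp only [List.map_cons, List.map_nil, List.map_map]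
    simp only [List.cons.injEq, and_true]
    refine ⟨?_, ?_, ?_, ?_, ?_⟩ <;>
    · apply pvStr_ext
      rw [pvJoin_toList, String.toList_ofList]
      simp [pvTail, pvRow, pvG, pvCat, List.map_map, Function.comp_def]

-- ===== VERDICT (by name: the statement is the Claim_ definition above) =====
theorem compose_crt_text_py_spec : Claim_equal_compose_crt_text_py := by
  intro text _ _
  unfold Spec_compose_crt_text_py
  exact pvMain text
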